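-- pv_equiv track=rewrite | github.com/zytros/Bachelor_Thesis | code/python/objServer/server.py | addUseMTL
-- ===== SOURCE A (Python) =====
-- def addUseMTL(obj):
--     lines = obj.split('\n')
--     for l in lines:
--         if l.startswith('usemtl'):
--             return obj
--     for i in range(len(lines)):
--         if lines[i].startswith('f '):
--             lines.insert(i, 'usemtl myMaterial')
--             break
--     return '\n'.join(lines)
-- ===== SOURCE B (Python) =====
-- def addUseMTL(obj):
--     # One pass over the raw string: track line starts, remember the offset of the
--     # first face line, then splice the usemtl line in by string slicing.
--     i, at_start, face_pos = 0, True, -1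
--     n = len(obj)
--     while i < n:
--         if at_start:
--             if obj.startswith('usemtl', i):
--                 return obj
--             if face_pos < 0 and obj.startswith('f ', i):
--                 face_pos = i
--         at_start = obj[i] == '\n'
--         i += 1
--     if face_pos < 0:
--         return obj
--     return obj[:face_pos] + 'usemtl myMaterial\n' + obj[face_pos:]
-- ===== Notes on version B (the rewrite author's own statement) =====
-- stated objective: alternative
-- what changed: Replaces the split-into-lines / scan-lines-twice / rejoin approach by a single character-level pass over the raw string that tracks line starts, records the offset of the first face line, and splices the usemtl line in by slicing; no line list is built and the original string is returned unchanged by identity.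
import Mathlib
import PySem

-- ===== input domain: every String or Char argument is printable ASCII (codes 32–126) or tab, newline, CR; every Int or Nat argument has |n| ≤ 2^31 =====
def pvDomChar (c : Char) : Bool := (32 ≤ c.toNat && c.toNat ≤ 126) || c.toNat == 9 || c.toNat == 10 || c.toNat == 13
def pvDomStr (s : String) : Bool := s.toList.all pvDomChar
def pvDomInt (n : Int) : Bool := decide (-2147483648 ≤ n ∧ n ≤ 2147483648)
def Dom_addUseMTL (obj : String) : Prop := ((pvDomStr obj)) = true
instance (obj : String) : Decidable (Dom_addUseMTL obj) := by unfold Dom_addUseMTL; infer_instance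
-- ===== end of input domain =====

-- B replaces A's split-lines/scan-twice/rejoin by a single raw-string pass that records the
-- offset of the first face line and splices by slicing (objective: alternative, same O(n)).

-- ===== PORT A =====
-- 'for l in lines: if l.startswith("usemtl"): return obj' — early-return loop over the lines
def pvHasUsemtl : List String → Bool
  | [] => false
  | l :: rest => if PySem.Str.startswith l "usemtl" then true else pvHasUsemtl rest

-- 'for i in range(len(lines)): if lines[i].startswith("f "): lines.insert(i, …); break'
def pvInsertFace : List String → List String
  | [] => []
  | l :: rest =>
    if PySem.Str.startswith l "f " then "usemtl myMaterial" :: l :: rest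
    else l :: pvInsertFace rest

def addUseMTL (obj : String) : String :=
  -- obj.split('\n'): sep "\n" is non-empty, so split? is always `some`; getD [] never fires
  let lines := (PySem.Str.split? obj "\n").getD []
  if pvHasUsemtl lines then obj
  else PySem.Str.join "\n" (pvInsertFace lines)

-- ===== PORT B =====
def pvUM : List Char := ['u', 's', 'e', 'm', 't', 'l']
def pvFS : List Char := ['f', ' ']

-- the while loop of Source B: suffix still to scan, current index i, at_start flag,
-- face_pos as Option Nat (Python's -1 sentinel = none); result none = early 'return obj'
def pvScan : List Char → Nat → Bool → Option Nat → Option (Option Nat)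
  | [], _, _, facePos => some facePos
  | c :: rest, i, atStart, facePos =>
    if atStart && PySem.Chars.startswith (c :: rest) pvUM then none
    else
      pvScan rest (i + 1) (c == '\n')
        (if atStart && facePos.isNone && PySem.Chars.startswith (c :: rest) pvFS then some i
         else facePos)

def addUseMTL_alt (obj : String) : String :=
  match pvScan obj.toList 0 true none with
  | none => obj
  | some none => obj
  | some (some p) =>
    -- obj[:p] + 'usemtl myMaterial\n' + obj[p:], exact for 0 ≤ p ≤ len(obj)
    String.ofList (obj.toList.take p ++ "usemtl myMaterial\n".toList ++ obj.toList.drop p)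

-- ===== PRECONDITION & SPEC =====
def Spec_addUseMTL (obj : String) (out : String) : Prop := out = addUseMTL_alt obj
instance (obj : String) (out : String) : Decidable (Spec_addUseMTL obj out) := by unfold Spec_addUseMTL; infer_instance

-- ===== CLAIM (what is proved, stated in full; the proofs are below) =====
def Claim_equal_addUseMTL : Prop := ∀ (obj : String), Dom_addUseMTL obj → Spec_addUseMTL obj (addUseMTL obj)

-- ===== LEMMAS AND PROOFS =====

-- spec-level split of a char list at every '\n' (cur = reversed chars of the open piece)
def pvS : List Char → List Char → List (List Char)
  | cur, [] => [cur.reverse]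
  | cur, c :: rest => if c = '\n' then cur.reverse :: pvS [] rest else pvS (c :: cur) rest

-- any line starts with "usemtl"
def pvHasU : List (List Char) → Bool
  | [] => false
  | l :: ls => PySem.Chars.startswith l pvUM || pvHasU ls

-- char offset of the first line starting with "f "
def pvFOff : List (List Char) → Option Nat
  | [] => none
  | l :: ls =>
    if PySem.Chars.startswith l pvFS then some 0
    else (pvFOff ls).map (· + (l.length + 1))

def pvIns : List Char := "usemtl myMaterial".toList

-- char-level insertFace
def pvIF : List (List Char) → List (List Char)
  | [] => []
  | l :: ls => if PySem.Chars.startswith l pvFS then pvIns :: l :: ls else l :: pvIF ls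

-- accumulator form of pvFOff matching the scan
def pvFF : List (List Char) → Nat → Option Nat → Option Nat
  | [], _, fp => fp
  | l :: ls, i, fp =>
    pvFF ls (i + (l.length + 1))
      (if fp.isNone && PySem.Chars.startswith l pvFS then some i else fp)

theorem pvGo_spec (fuel : Nat) (l cur : List Char) (acc : List (List Char))
    (h : l.length ≤ fuel) :
    PySem.Chars.splitOn.go ['\n'] fuel l cur acc = acc.reverse ++ pvS cur l := by
  induction fuel generalizing l cur acc with
  | zero =>
    have hl : l = [] := by cases l <;> simp_all
    subst hl
    simp [PySem.Chars.splitOn.go, pvS]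
  | succ fuel ih =>
    cases l with
    | nil => simp [PySem.Chars.splitOn.go, pvS]
    | cons c rest =>
      have hlen : rest.length ≤ fuel := by simp at h; omega
      by_cases hc : c = '\n'
      · subst hc
        have hpre : List.isPrefixOf ['\n'] ('\n' :: rest) = true := by
          simp [List.isPrefixOf]
        rw [PySem.Chars.splitOn.go, if_pos hpre]
        simp only [List.length_cons, List.length_nil, List.drop_succ_cons, List.drop_zero,
          Nat.zero_add]
        rw [ih _ _ _ hlen]
        simp [pvS]
      · have hpre : List.isPrefixOf ['\n'] (c :: rest) = false := by
          simp [List.isPrefixOf]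
          exact fun hcontra => (hc hcontra.symm).elim
        rw [PySem.Chars.splitOn.go, if_neg (by simp [hpre])]
        rw [ih _ _ _ hlen]
        simp [pvS, hc]

theorem pvSplit_eq (cs : List Char) : PySem.Chars.splitOn cs ['\n'] = pvS [] cs := by
  unfold PySem.Chars.splitOn
  rw [pvGo_spec (cs.length + 1) cs [] [] (by omega)]
  simp

theorem pvS_ne_nil (cur cs : List Char) : pvS cur cs ≠ [] := by
  induction cs generalizing cur with
  | nil => simp [pvS]
  | cons c rest ih =>
    by_cases hc : c = '\n'
    · simp [pvS, hc]
    · simpa [pvS, hc] using ih (c :: cur)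

theorem pvJoin_S (cs cur : List Char) :
    PySem.Chars.join ['\n'] (pvS cur cs) = cur.reverse ++ cs := by
  induction cs generalizing cur with
  | nil => simp [pvS, PySem.Chars.join_singleton]
  | cons c rest ih =>
    by_cases hc : c = '\n'
    · subst hc
      cases hrest : pvS [] rest with
      | nil => exact absurd hrest (pvS_ne_nil [] rest)
      | cons x xs =>
        rw [show pvS cur ('\n' :: rest) = cur.reverse :: pvS [] rest by simp [pvS]]
        rw [hrest, PySem.Chars.join_cons_cons]
        have h2 := ih ([] : List Char)
        rw [hrest] at h2
        simp only [List.reverse_nil, List.nil_append] at h2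
        rw [h2]
        simp
    · simp only [pvS, if_neg hc]
      rw [ih (c :: cur)]
      simp

theorem pvPrefix_line (u l r : List Char) (hu : '\n' ∉ u) :
    u <+: l ++ '\n' :: r ↔ u <+: l := by
  induction l generalizing u with
  | nil =>
    cases u with
    | nil => simp
    | cons c u' =>
      have hc : c ≠ '\n' := fun hcc => hu (hcc ▸ List.mem_cons_self ..)
      simp [List.cons_prefix_cons, fun hcc => hc hcc]
  | cons a l' ih =>
    cases u with
    | nil => simp
    | cons c u' =>
      have hu' : '\n' ∉ u' := fun hm => hu (List.mem_cons_of_mem _ hm)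
      simp only [List.cons_append, List.cons_prefix_cons]
      rw [ih u' hu']

theorem pvSW_line (u l r : List Char) (hu : '\n' ∉ u) :
    PySem.Chars.startswith (l ++ '\n' :: r) u = PySem.Chars.startswith l u := by
  rw [Bool.eq_iff_iff]
  simp only [PySem.Chars.startswith_iff]
  exact pvPrefix_line u l r hu

theorem pvScan_inner (l cs : List Char) (i : Nat) (fp : Option Nat) (h : '\n' ∉ l) :
    pvScan (l ++ cs) i false fp = pvScan cs (i + l.length) false fp := by
  induction l generalizing i fp with
  | nil => simp
  | cons c l' ih =>
    have hc : c ≠ '\n' := fun hcc => h (hcc ▸ List.mem_cons_self ..)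
    have hc' : (c == '\n') = false := by simpa using hc
    have h' : '\n' ∉ l' := fun hm => h (List.mem_cons_of_mem _ hm)
    rw [List.cons_append, pvScan]
    simp only [Bool.false_and, Bool.false_eq_true, if_false, hc']
    rw [ih _ _ h']
    have harith : i + 1 + l'.length = i + (c :: l').length := by simp; omega
    rw [harith]

theorem pvScan_line (l r : List Char) (i : Nat) (fp : Option Nat) (h : '\n' ∉ l) :
    pvScan (l ++ '\n' :: r) i true fp =
      if PySem.Chars.startswith l pvUM then none
      else pvScan r (i + (l.length + 1)) true
        (if fp.isNone && PySem.Chars.startswith l pvFS then some i else fp) := by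
  cases l with
  | nil =>
    have h1 : PySem.Chars.startswith ('\n' :: r) pvUM = false := by
      simp [PySem.Chars.startswith, pvUM, List.isPrefixOf]
    have h2 : PySem.Chars.startswith ('\n' :: r) pvFS = false := by
      simp [PySem.Chars.startswith, pvFS, List.isPrefixOf]
    have h3 : PySem.Chars.startswith ([] : List Char) pvUM = false := by decide
    have h4 : PySem.Chars.startswith ([] : List Char) pvFS = false := by decide
    simp [pvScan, h1, h2, h3, h4]
  | cons c l' =>
    have hc : c ≠ '\n' := fun hcc => h (hcc ▸ List.mem_cons_self ..)
    have hc' : (c == '\n') = false := by simpa using hc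
    have h' : '\n' ∉ l' := fun hm => h (List.mem_cons_of_mem _ hm)
    have hUM : PySem.Chars.startswith (c :: (l' ++ '\n' :: r)) pvUM
        = PySem.Chars.startswith (c :: l') pvUM := by
      rw [← List.cons_append]; exact pvSW_line _ _ _ (by decide)
    have hFS : PySem.Chars.startswith (c :: (l' ++ '\n' :: r)) pvFS
        = PySem.Chars.startswith (c :: l') pvFS := by
      rw [← List.cons_append]; exact pvSW_line _ _ _ (by decide)
    rw [List.cons_append, pvScan, hUM, hFS]
    simp only [Bool.true_and]
    by_cases hsw : PySem.Chars.startswith (c :: l') pvUM = true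
    · simp [hsw]
    · have hswf : PySem.Chars.startswith (c :: l') pvUM = false := by simpa using hsw
      simp only [hswf, Bool.false_eq_true, if_false, hc']
      rw [pvScan_inner l' ('\n' :: r) _ _ h', pvScan]
      simp only [Bool.false_and, Bool.false_eq_true, if_false, beq_self_eq_true]
      have harith : i + 1 + l'.length + 1 = i + ((c :: l').length + 1) := by simp; omega
      rw [harith]

theorem pvScan_last (l : List Char) (i : Nat) (fp : Option Nat) (h : '\n' ∉ l) :
    pvScan l i true fp =
      if PySem.Chars.startswith l pvUM then none
      else some (if fp.isNone && PySem.Chars.startswith l pvFS then some i else fp) := by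
  cases l with
  | nil =>
    have h3 : PySem.Chars.startswith ([] : List Char) pvUM = false := by decide
    have h4 : PySem.Chars.startswith ([] : List Char) pvFS = false := by decide
    simp [pvScan, h3, h4]
  | cons c l' =>
    have hc : c ≠ '\n' := fun hcc => h (hcc ▸ List.mem_cons_self ..)
    have hc' : (c == '\n') = false := by simpa using hc
    have h' : '\n' ∉ l' := fun hm => h (List.mem_cons_of_mem _ hm)
    rw [pvScan]
    simp only [Bool.true_and]
    by_cases hsw : PySem.Chars.startswith (c :: l') pvUM = true
    · simp [hsw]
    · have hswf : PySem.Chars.startswith (c :: l') pvUM = false := by simpa using hsw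
      have hinner : ∀ fp' : Option Nat,
          pvScan l' (i + 1) false fp' = pvScan [] (i + 1 + l'.length) false fp' := by
        intro fp'
        have hx := pvScan_inner l' [] (i + 1) fp' h'
        simpa using hx
      simp only [hswf, Bool.false_eq_true, if_false, hc']
      rw [hinner, pvScan]

theorem pvS_free (l cur : List Char) (h : '\n' ∉ l) : pvS cur l = [cur.reverse ++ l] := by
  induction l generalizing cur with
  | nil => simp [pvS]
  | cons c l' ih =>
    have hc : c ≠ '\n' := fun hcc => h (hcc ▸ List.mem_cons_self ..)
    have h' : '\n' ∉ l' := fun hm => h (List.mem_cons_of_mem _ hm)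
    simp only [pvS, if_neg hc]
    rw [ih _ h']
    simp

theorem pvS_line (l r cur : List Char) (h : '\n' ∉ l) :
    pvS cur (l ++ '\n' :: r) = (cur.reverse ++ l) :: pvS [] r := by
  induction l generalizing cur with
  | nil => simp [pvS]
  | cons c l' ih =>
    have hc : c ≠ '\n' := fun hcc => h (hcc ▸ List.mem_cons_self ..)
    have h' : '\n' ∉ l' := fun hm => h (List.mem_cons_of_mem _ hm)
    simp only [List.cons_append, pvS, if_neg hc]
    rw [ih _ h']
    simp

theorem pvMain1 (cs : List Char) (i : Nat) (fp : Option Nat) :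
    pvScan cs i true fp =
      if pvHasU (pvS [] cs) then none else some (pvFF (pvS [] cs) i fp) := by
  have key : ∀ (n : Nat) (cs : List Char), cs.length ≤ n → ∀ (i : Nat) (fp : Option Nat),
      pvScan cs i true fp =
        if pvHasU (pvS [] cs) then none else some (pvFF (pvS [] cs) i fp) := by
    intro n
    induction n with
    | zero =>
      intro cs hlen i fp
      have hnil : cs = [] := by cases cs <;> simp_all
      subst hnil
      simp [pvScan, pvS, pvHasU, pvFF, (by decide : PySem.Chars.startswith [] pvUM = false),
        (by decide : PySem.Chars.startswith [] pvFS = false)]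
    | succ n ih =>
      intro cs hlen i fp
      by_cases hmem : '\n' ∈ cs
      · -- decompose cs = l ++ '\n' :: r with '\n' ∉ l
        have hdne : cs.dropWhile (· ≠ '\n') ≠ [] := by
          intro hnil
          rw [List.dropWhile_eq_nil_iff] at hnil
          exact (by simpa using hnil _ hmem)
        obtain ⟨d, r, hd⟩ : ∃ d r, cs.dropWhile (· ≠ '\n') = d :: r := by
          cases hx : cs.dropWhile (· ≠ '\n') with
          | nil => exact absurd hx hdne
          | cons d r => exact ⟨d, r, rfl⟩
        have hdn : d = '\n' := by
          have hh := List.head_dropWhile_not (p := fun c => c ≠ '\n') (l := cs) (by simpa using hdne)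
          simp only [hd] at hh
          simpa using hh
        subst hdn
        set l := cs.takeWhile (· ≠ '\n') with hl
        have hsplit : cs = l ++ '\n' :: r := by
          rw [hl, ← hd, List.takeWhile_append_dropWhile]
        have hlnin : '\n' ∉ l := by
          intro hm
          have := List.mem_takeWhile_imp hm
          simp at this
        have hrlen : r.length ≤ n := by
          have := congrArg List.length hsplit
          simp at this
          omega
        rw [hsplit, pvScan_line l r i fp hlnin, pvS_line l r [] hlnin]
        simp only [List.reverse_nil, List.nil_append, pvHasU, pvFF]
        by_cases hsw : PySem.Chars.startswith l pvUM = true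
        · simp [hsw]
        · simp only [hsw, Bool.false_or, Bool.false_eq_true, if_false]
          rw [ih r hrlen]
          rfl
      · rw [pvScan_last cs i fp hmem, pvS_free cs [] hmem]
        simp [pvHasU, pvFF]
  exact key cs.length cs le_rfl i fp

theorem pvFF_some (ls : List (List Char)) (i q : Nat) : pvFF ls i (some q) = some q := by
  induction ls generalizing i with
  | nil => simp [pvFF]
  | cons l ls ih => simp [pvFF, ih]

theorem pvFF_none (ls : List (List Char)) (i : Nat) :
    pvFF ls i none = (pvFOff ls).map (· + i) := by
  induction ls generalizing i with
  | nil => simp [pvFF, pvFOff]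
  | cons l ls ih =>
    by_cases hsw : PySem.Chars.startswith l pvFS = true
    · simp [pvFF, pvFOff, hsw, pvFF_some]
    · simp only [pvFF, pvFOff, hsw, Option.isNone_none, Bool.true_and, Bool.false_eq_true,
        if_false]
      rw [ih]
      cases pvFOff ls
      · simp
      · simp
        omega

theorem pvIF_of_none (ls : List (List Char)) (h : pvFOff ls = none) : pvIF ls = ls := by
  induction ls with
  | nil => rfl
  | cons l ls ih =>
    by_cases hsw : PySem.Chars.startswith l pvFS = true
    · simp [pvFOff, hsw] at h
    · simp only [pvFOff, hsw, Bool.false_eq_true, if_false, Option.map_eq_none_iff] at h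
      simp [pvIF, hsw, ih h]

theorem pvIF_ne_nil (ls : List (List Char)) (h : ls ≠ []) : pvIF ls ≠ [] := by
  cases ls with
  | nil => exact absurd rfl h
  | cons l ls => simp only [pvIF]; split <;> simp

theorem pvIF_some (ls : List (List Char)) (p : Nat) (h : pvFOff ls = some p) :
    PySem.Chars.join ['\n'] (pvIF ls) =
      (PySem.Chars.join ['\n'] ls).take p ++ pvIns ++ '\n' :: (PySem.Chars.join ['\n'] ls).drop p := by
  induction ls generalizing p with
  | nil => simp [pvFOff] at h
  | cons l ls ih =>
    by_cases hsw : PySem.Chars.startswith l pvFS = true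
    · have hp : p = 0 := by simp [pvFOff, hsw] at h; omega
      subst hp
      cases ls with
      | nil =>
        simp [pvIF, hsw, PySem.Chars.join_cons_cons, PySem.Chars.join_singleton]
      | cons m ls' =>
        simp [pvIF, hsw, PySem.Chars.join_cons_cons]
    · -- first face is inside ls
      obtain ⟨q, hq, hpq⟩ : ∃ q, pvFOff ls = some q ∧ p = q + (l.length + 1) := by
        simp only [pvFOff, hsw, Bool.false_eq_true, if_false] at h
        cases hx : pvFOff ls with
        | none => rw [hx] at h; simp at h
        | some q => rw [hx] at h; simp at h; exact ⟨q, rfl, h.symm⟩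
      have hlsne : ls ≠ [] := by intro hn; rw [hn] at hq; simp [pvFOff] at hq
      obtain ⟨m, ls', hls⟩ : ∃ m ls', ls = m :: ls' := by
        cases ls with
        | nil => exact absurd rfl hlsne
        | cons m ls' => exact ⟨m, ls', rfl⟩
      obtain ⟨y, ys, hy⟩ : ∃ y ys, pvIF ls = y :: ys := by
        cases hx : pvIF ls with
        | nil => exact absurd hx (pvIF_ne_nil ls hlsne)
        | cons y ys => exact ⟨y, ys, rfl⟩
      have hJ := ih q hq
      simp only [pvIF, hsw, Bool.false_eq_true, if_false]
      rw [hy, PySem.Chars.join_cons_cons, ← hy, hJ, hls, PySem.Chars.join_cons_cons, ← hls]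
      set J := PySem.Chars.join ['\n'] ls with hJdef
      have hre : l ++ ['\n'] ++ J = l ++ '\n' :: J := by simp
      rw [hre, hpq]
      have htake : (l ++ '\n' :: J).take (q + (l.length + 1)) = l ++ '\n' :: J.take q := by
        rw [List.take_append]
        have h1 : (q + (l.length + 1)) - l.length = q + 1 := by omega
        have h2 : l.take (q + (l.length + 1)) = l := List.take_of_length_le (by omega)
        rw [h1, h2]
        simp
      have hdrop : (l ++ '\n' :: J).drop (q + (l.length + 1)) = J.drop q := by
        rw [List.drop_append]
        have h1 : (q + (l.length + 1)) - l.length = q + 1 := by omega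
        have h2 : l.drop (q + (l.length + 1)) = [] := List.drop_eq_nil_of_le (by omega)
        rw [h1, h2]
        simp
      rw [htake, hdrop]
      simp

theorem pvHasUsemtl_bridge (ss : List String) :
    pvHasUsemtl ss = pvHasU (ss.map String.toList) := by
  induction ss with
  | nil => rfl
  | cons l ss ih =>
    simp only [pvHasUsemtl, List.map_cons, pvHasU, PySem.Str.startswith_eq,
      (by decide : ("usemtl" : String).toList = pvUM)]
    rw [ih]
    cases PySem.Chars.startswith l.toList pvUM <;> simp

theorem pvInsertFace_bridge (ss : List String) :
    (pvInsertFace ss).map String.toList = pvIF (ss.map String.toList) := by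
  induction ss with
  | nil => rfl
  | cons l ss ih =>
    simp only [pvInsertFace, List.map_cons, pvIF, PySem.Str.startswith_eq,
      (by decide : ("f " : String).toList = pvFS)]
    split <;> simp_all [pvIns]

-- ===== VERDICT (by name: the statement is the Claim_ definition above) =====
theorem addUseMTL_spec : Claim_equal_addUseMTL := by
  intro obj _
  unfold Spec_addUseMTL addUseMTL addUseMTL_alt
  obtain ⟨ss, hss, hmap⟩ : ∃ ss, PySem.Str.split? obj "\n" = some ss ∧
      ss.map String.toList = pvS [] obj.toList := by
    have h := PySem.Str.split?_map obj "\n"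
    rw [(by decide : ("\n" : String).toList = ['\n'])] at h
    cases hs : PySem.Str.split? obj "\n" with
    | none => rw [hs] at h; simp [PySem.Chars.split?] at h
    | some ss =>
      refine ⟨ss, rfl, ?_⟩
      rw [hs] at h
      simp only [Option.map_some, PySem.Chars.split?, List.isEmpty_cons, if_false,
        Option.some_inj, Bool.false_eq_true] at h
      rw [h, pvSplit_eq]
  rw [hss]
  simp only [Option.getD_some]
  rw [pvMain1, pvHasUsemtl_bridge, hmap]
  by_cases hU : pvHasU (pvS [] obj.toList) = true
  · simp [hU]
  · simp only [hU, Bool.false_eq_true, if_false]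
    rw [pvFF_none]
    cases hF : pvFOff (pvS [] obj.toList) with
    | none =>
      simp only [Option.map_none]
      apply String.toList_inj.mp
      rw [PySem.Str.toList_join, (by decide : ("\n" : String).toList = ['\n']),
        pvInsertFace_bridge, hmap, pvIF_of_none _ hF, pvJoin_S]
      simp
    | some p =>
      simp only [Option.map_some]
      apply String.toList_inj.mp
      rw [PySem.Str.toList_join, (by decide : ("\n" : String).toList = ['\n']),
        pvInsertFace_bridge, hmap, pvIF_some _ (p + 0) (by simpa using hF)]
      rw [pvJoin_S]
      simp only [List.reverse_nil, List.nil_append, String.toList_ofList]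
      rw [(by decide : ("usemtl myMaterial\n" : String).toList = pvIns ++ ['\n'])]
      simp
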